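-- pv_equiv track=rewrite | github.com/spins-ai/turf-data-pipeline | feature_builders/cross_source_signals_builder.py | _count_sources
-- ===== SOURCE A (Python) =====
-- _SOURCE_PREFIXES = (
--     "rap_",      # rapports
--     "cmb_",      # combinaisons
--     "seq_",      # sequences
--     "spd_",      # speed figures
--     "ped_",      # pedigree
--     "meteo_",    # meteo
--     "elo_",      # elo ratings
--     "odds_",     # odds-derived
-- )
--
-- def _count_sources(rec: dict) -> int:
--     """Count how many distinct source prefixes have at least one non-null field."""
--     found = 0
--     for prefix in _SOURCE_PREFIXES:
--         for key, val in rec.items():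
--             if key.startswith(prefix) and val is not None:
--                 found += 1
--                 break
--     return found
-- ===== SOURCE B (Python) =====
-- _SOURCE_PREFIXES = (
--     "rap_",
--     "cmb_",
--     "seq_",
--     "spd_",
--     "ped_",
--     "meteo_",
--     "elo_",
--     "odds_",
-- )
--
--
-- def _count_sources(rec: dict) -> int:
--     """Count how many distinct source prefixes have at least one non-null field."""
--     found = set()
--     for key, val in rec.items():
--         if val is None:
--             continue
--         prefix = next((p for p in _SOURCE_PREFIXES if key.startswith(p)), None)
--         if prefix is not None:
--             found.add(prefix)
--     return len(found)
-- ===== Notes on version B (the rewrite author's own statement) =====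
-- stated objective: simpler
-- what changed: Inverts the loop nesting: one pass over rec.items() that maps each non-null key to its (unique) matching prefix and collects distinct prefixes in a set, returning its size, instead of scanning the whole record once per prefix with an early break.
import Mathlib
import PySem

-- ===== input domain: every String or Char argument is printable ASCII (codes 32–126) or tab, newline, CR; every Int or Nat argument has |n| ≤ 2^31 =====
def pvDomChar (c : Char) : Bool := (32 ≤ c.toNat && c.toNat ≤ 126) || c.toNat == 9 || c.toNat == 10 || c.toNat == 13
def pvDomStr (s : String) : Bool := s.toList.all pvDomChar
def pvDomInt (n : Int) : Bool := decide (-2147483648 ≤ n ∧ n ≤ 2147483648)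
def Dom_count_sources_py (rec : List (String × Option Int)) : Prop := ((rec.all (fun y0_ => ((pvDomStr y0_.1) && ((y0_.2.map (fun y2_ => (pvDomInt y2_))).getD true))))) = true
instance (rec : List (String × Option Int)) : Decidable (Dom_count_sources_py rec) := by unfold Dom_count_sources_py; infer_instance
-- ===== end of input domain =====

-- B inverts A's loop nesting: a single pass over rec.items() collecting each non-null key's matching
-- prefix into a set, returning its size (objective: simpler; same results, no speed claim).


-- ===== PORT A =====
-- the module constant _SOURCE_PREFIXES
def pvPrefixes : List String := ["rap_", "cmb_", "seq_", "spd_", "ped_", "meteo_", "elo_", "odds_"]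

-- the dict parameter as a PySem.Dict built from the pairs in insertion order (duplicate keys
-- overwrite in place, as dict(pairs) does); rec.items() iterates this list (shared input decoding)
def pvItems (rec : List (String × Option Int)) : List (String × Option Int) :=
  PySem.Dict.items (rec.foldl (fun d kv => PySem.Dict.insert d kv.1 kv.2) PySem.Dict.empty)

-- A's inner 'for key, val in rec.items(): if …: found += 1; break'
def pvScanA (pre : String) : List (String × Option Int) → Bool
  | [] => false
  | kv :: rest =>
    if PySem.Str.startswith kv.1 pre && kv.2.isSome then true else pvScanA pre rest

def count_sources_py (rec : List (String × Option Int)) : Int :=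
  let items := pvItems rec
  pvPrefixes.foldl (fun found pre => if pvScanA pre items then found + 1 else found) 0

-- ===== PORT B =====
def count_sources_py_alt (rec : List (String × Option Int)) : Int :=
  let found : PySem.Set String :=
    (pvItems rec).foldl
      (fun s kv =>
        if kv.2.isNone then s
        else
          -- next((p for p in _SOURCE_PREFIXES if key.startswith(p)), None)
          match pvPrefixes.find? (fun p => PySem.Str.startswith kv.1 p) with
          | some p => PySem.Set.add s p
          | none => s)
      PySem.Set.empty
  PySem.Set.len found

-- ===== PRECONDITION & SPEC =====
def Spec_count_sources_py (rec : List (String × Option Int)) (out : Int) : Prop := out = count_sources_py_alt rec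
instance (rec : List (String × Option Int)) (out : Int) : Decidable (Spec_count_sources_py rec out) := by unfold Spec_count_sources_py; infer_instance

-- ===== CLAIM (what is proved, stated in full; the proofs are below) =====
def Claim_equal_count_sources_py : Prop := ∀ (rec : List (String × Option Int)), Dom_count_sources_py rec → Spec_count_sources_py rec (count_sources_py rec)

-- ===== LEMMAS AND PROOFS =====

-- A's inner scan-with-break finds a match iff one exists
theorem pvScanA_iff (pre : String) (L : List (String × Option Int)) :
    pvScanA pre L = true ↔ ∃ kv ∈ L, PySem.Str.startswith kv.1 pre = true ∧ kv.2.isSome = true := by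
  induction L with
  | nil => simp [pvScanA]
  | cons kv rest ih =>
    simp only [pvScanA]
    by_cases h : (PySem.Str.startswith kv.1 pre && kv.2.isSome) = true
    · rw [if_pos h]
      rw [Bool.and_eq_true] at h
      constructor
      · intro _; exact ⟨kv, List.mem_cons_self, h.1, h.2⟩
      · intro _; rfl
    · rw [if_neg h, ih]
      rw [Bool.and_eq_true] at h
      constructor
      · rintro ⟨kv', hm, hp⟩; exact ⟨kv', List.mem_cons_of_mem _ hm, hp⟩
      · rintro ⟨kv', hm, hp⟩
        rcases List.mem_cons.mp hm with rfl | hm'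
        · exact absurd ⟨hp.1, hp.2⟩ h
        · exact ⟨kv', hm', hp⟩

-- counting fold = length of the filtered list
theorem pvCountFold (g : String → Bool) :
    ∀ (P : List String) (acc : Int),
      P.foldl (fun found pre => if g pre then found + 1 else found) acc
        = acc + ((P.filter g).length : Int) := by
  intro P
  induction P with
  | nil => intro acc; simp
  | cons p rest ih =>
    intro acc
    by_cases h : g p = true
    · simp [List.foldl_cons, h, ih]; ring
    · simp [List.foldl_cons, h, ih]

-- no prefix of the table is a (string-)prefix of a distinct, not-shorter one (finite check)
theorem pv_no_prefix_pair :
    ∀ p ∈ pvPrefixes, ∀ q ∈ pvPrefixes,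
      p.toList.length ≤ q.toList.length → p.toList <+: q.toList → p = q := by decide

-- hence a key starts with at most one prefix of the table
theorem pv_uniq {l : List Char} {p q : String}
    (hp : p ∈ pvPrefixes) (hq : q ∈ pvPrefixes)
    (h1 : p.toList <+: l) (h2 : q.toList <+: l) : p = q := by
  rcases le_total p.toList.length q.toList.length with h | h
  · exact pv_no_prefix_pair p hp q hq h (List.prefix_of_prefix_length_le h1 h2 h)
  · exact (pv_no_prefix_pair q hq p hp h (List.prefix_of_prefix_length_le h2 h1 h)).symm

theorem pv_startswith_iff (k p : String) :
    PySem.Str.startswith k p = true ↔ p.toList <+: k.toList := by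
  simp [PySem.Chars.startswith_iff]

-- find? over the table returns exactly the (unique) matching prefix
theorem pv_find?_eq_some_iff (k p : String) :
    pvPrefixes.find? (fun q => PySem.Str.startswith k q) = some p
      ↔ p ∈ pvPrefixes ∧ PySem.Str.startswith k p = true := by
  constructor
  · intro h
    exact ⟨List.mem_of_find?_eq_some h, List.find?_some h⟩
  · rintro ⟨hp, hs⟩
    have hsome : (pvPrefixes.find? (fun q => PySem.Str.startswith k q)).isSome := by
      rw [List.find?_isSome]
      exact ⟨p, hp, hs⟩
    obtain ⟨q, hq⟩ := Option.isSome_iff_exists.mp hsome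
    have hqm := List.mem_of_find?_eq_some hq
    have hqs := List.find?_some hq
    have : q = p :=
      pv_uniq hqm hp ((pv_startswith_iff k q).mp hqs) ((pv_startswith_iff k p).mp hs)
    rw [hq, this]

-- the body of B's fold
def pvStepB (s : PySem.Set String) (kv : String × Option Int) : PySem.Set String :=
  if kv.2.isNone then s
  else
    match pvPrefixes.find? (fun p => PySem.Str.startswith kv.1 p) with
    | some p => PySem.Set.add s p
    | none => s

theorem pv_mem_stepB (s : PySem.Set String) (kv : String × Option Int) (p : String) :
    p ∈ pvStepB s kv
      ↔ p ∈ s ∨ (kv.2.isSome = true ∧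
          pvPrefixes.find? (fun q => PySem.Str.startswith kv.1 q) = some p) := by
  unfold pvStepB
  by_cases h : kv.2.isNone = true
  · simp [Option.isNone_iff_eq_none.mp h]
  · have h' : kv.2.isSome = true := by
      cases hv : kv.2 <;> simp [hv] at h ⊢
    simp only [h]
    cases hf : pvPrefixes.find? (fun q => PySem.Str.startswith kv.1 q) with
    | none => simp [h']
    | some q => simp [PySem.Set.mem_add, h', eq_comm]

theorem pv_mem_foldB :
    ∀ (L : List (String × Option Int)) (s : PySem.Set String) (p : String),
      p ∈ L.foldl pvStepB s
        ↔ p ∈ s ∨ ∃ kv ∈ L, kv.2.isSome = true ∧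
            pvPrefixes.find? (fun q => PySem.Str.startswith kv.1 q) = some p := by
  intro L
  induction L with
  | nil => intro s p; simp
  | cons kv rest ih =>
    intro s p
    rw [List.foldl_cons, ih, pv_mem_stepB]
    constructor
    · rintro ((hs | hkv) | ⟨kv', hm, hp⟩)
      · exact Or.inl hs
      · exact Or.inr ⟨kv, List.mem_cons_self, hkv⟩
      · exact Or.inr ⟨kv', List.mem_cons_of_mem _ hm, hp⟩
    · rintro (hs | ⟨kv', hm, hp⟩)
      · exact Or.inl (Or.inl hs)
      · rcases List.mem_cons.mp hm with rfl | hm'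
        · exact Or.inl (Or.inr hp)
        · exact Or.inr ⟨kv', hm', hp⟩

theorem pv_nodup_stepB (s : PySem.Set String) (kv : String × Option Int)
    (h : s.Nodup) : (pvStepB s kv).Nodup := by
  unfold pvStepB
  by_cases hn : kv.2.isNone = true
  · simpa [hn]
  · simp only [hn]
    cases hf : pvPrefixes.find? (fun q => PySem.Str.startswith kv.1 q) with
    | none => exact h
    | some q => exact PySem.Set.nodup_add s q h

theorem pv_nodup_foldB :
    ∀ (L : List (String × Option Int)) (s : PySem.Set String),
      s.Nodup → (L.foldl pvStepB s).Nodup := by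
  intro L
  induction L with
  | nil => intro s h; simpa
  | cons kv rest ih => intro s h; exact ih _ (pv_nodup_stepB s kv h)

theorem pv_nodup_prefixes : pvPrefixes.Nodup := by decide

-- the distinct prefixes B collects are exactly the prefixes A counts
theorem pv_main (L : List (String × Option Int)) :
    (L.foldl pvStepB PySem.Set.empty).length
      = (pvPrefixes.filter (fun pre => pvScanA pre L)).length := by
  apply List.Perm.length_eq
  have h0 : (PySem.Set.empty : PySem.Set String).Nodup := List.nodup_nil
  rw [List.perm_ext_iff_of_nodup (pv_nodup_foldB L PySem.Set.empty h0)
      (List.Nodup.filter _ pv_nodup_prefixes)]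
  intro p
  rw [pv_mem_foldB, List.mem_filter]
  constructor
  · rintro (hs | ⟨kv, hm, hsome, hf⟩)
    · cases hs
    · obtain ⟨hp, hsw⟩ := (pv_find?_eq_some_iff kv.1 p).mp hf
      exact ⟨hp, (pvScanA_iff p L).mpr ⟨kv, hm, hsw, hsome⟩⟩
  · rintro ⟨hp, hscan⟩
    obtain ⟨kv, hm, hsw, hsome⟩ := (pvScanA_iff p L).mp hscan
    exact Or.inr ⟨kv, hm, hsome, (pv_find?_eq_some_iff kv.1 p).mpr ⟨hp, hsw⟩⟩

-- ===== VERDICT (by name: the statement is the Claim_ definition above) =====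
theorem count_sources_py_spec : Claim_equal_count_sources_py := by
  intro rec _
  unfold Spec_count_sources_py count_sources_py count_sources_py_alt
  have hfold : (pvItems rec).foldl
      (fun s kv =>
        if kv.2.isNone then s
        else
          match pvPrefixes.find? (fun p => PySem.Str.startswith kv.1 p) with
          | some p => PySem.Set.add s p
          | none => s)
      PySem.Set.empty = (pvItems rec).foldl pvStepB PySem.Set.empty := rfl
  simp only [hfold]
  rw [pvCountFold]
  have h := pv_main (pvItems rec)
  simp only [PySem.Set.len]
  rw [h]
  simp
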